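-- pv_equiv track=rewrite | github.com/gabrieljonathanabebe/MyToDo | ui.py | get_widths
-- ===== SOURCE A (Python) =====
-- def get_widths(
--     display_rows: list[dict], columns: list[str]
-- ) -> tuple[dict[str, int], int]:
--     col_widths = {}
--     for col in columns:
--         col_cells = [
--             display_row.get(col, '') for display_row in display_rows
--         ]
--         col_cells.append(col)
--         col_widths[col] = max(len(str(c)) for c in col_cells) + 2
--     table_width = sum(w + 1 for w in col_widths.values()) - 1
--     return col_widths, table_width
-- ===== SOURCE B (Python) =====
-- def get_widths(display_rows, columns):
--     header = [len(str(col)) for col in columns]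
--
--     def vec(row):
--         return [len(str(row.get(col, ''))) for col in columns]
--
--     def merge(u, v):
--         return [max(a, b) for a, b in zip(u, v)]
--
--     def maxvec(rows):
--         if not rows:
--             return header
--         if len(rows) == 1:
--             return merge(vec(rows[0]), header)
--         mid = len(rows) // 2
--         return merge(maxvec(rows[:mid]), maxvec(rows[mid:]))
--
--     w = maxvec(display_rows)
--     col_widths = dict(zip(columns, (x + 2 for x in w)))
--     table_width = sum(x + 1 for x in col_widths.values()) - 1
--     return col_widths, table_width
-- ===== Notes on version B (the rewrite author's own statement) =====
-- stated objective: alternative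
-- what changed: B computes a width vector per row and reduces them by divide-and-conquer: it recursively splits the row list in half and merges halves by elementwise max (headers as the base case), instead of A's column-major pass that materialises each column's cell list and maxes it.
import Mathlib
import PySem

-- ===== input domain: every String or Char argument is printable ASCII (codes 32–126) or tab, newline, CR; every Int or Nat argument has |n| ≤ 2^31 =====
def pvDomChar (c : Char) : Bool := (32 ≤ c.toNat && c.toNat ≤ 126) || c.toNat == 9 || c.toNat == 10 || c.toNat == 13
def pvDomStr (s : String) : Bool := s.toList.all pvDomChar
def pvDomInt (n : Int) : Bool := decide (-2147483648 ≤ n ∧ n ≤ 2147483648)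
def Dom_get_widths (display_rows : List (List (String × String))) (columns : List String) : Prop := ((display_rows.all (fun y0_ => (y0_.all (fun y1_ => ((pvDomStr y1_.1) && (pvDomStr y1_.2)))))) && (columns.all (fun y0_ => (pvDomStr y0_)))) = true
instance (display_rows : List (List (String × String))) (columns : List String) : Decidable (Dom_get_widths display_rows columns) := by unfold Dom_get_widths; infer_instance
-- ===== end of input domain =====

-- B replaces A's column-major pass (materialise each column's cell list, then max it) by a
-- divide-and-conquer reduction: a width vector per row, row list split in half recursively and
-- halves merged by elementwise max, headers as the base case (objective: alternative).

-- ===== PORT A =====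
-- display_row.get(col, '') : first-match lookup in the row's association list
def pvCell (row : List (String × String)) (col : String) : String :=
  (PySem.Dict.mk row).getD col ""

def get_widths (display_rows : List (List (String × String))) (columns : List String) : (List (String × Int)) × Int :=
  let col_widths : PySem.Dict String Int := columns.foldl (fun d col =>
    let col_cells := (display_rows.map (fun display_row => pvCell display_row col)) ++ [col]
    -- max(len(str(c)) for c in col_cells): col_cells is never empty (col was appended), so the .getD 0 guard never fires
    d.insert col ((PySem.List.max? (col_cells.map (fun c => PySem.Str.len c)) (fun x => x)).getD 0 + 2)) PySem.Dict.empty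
  (col_widths.items, ((col_widths.values.map (fun w => w + 1)).sum) - 1)

-- ===== PORT B =====
-- header = [len(str(col)) for col in columns]
def pvHeaderVec (columns : List String) : List Int := columns.map (fun col => PySem.Str.len col)
-- vec(row) = [len(str(row.get(col, ''))) for col in columns]
def pvVec (columns : List String) (row : List (String × String)) : List Int :=
  columns.map (fun col => PySem.Str.len (pvCell row col))
-- merge(u, v) = [max(a, b) for a, b in zip(u, v)]
def pvMerge (u v : List Int) : List Int := (u.zip v).map (fun p => max p.1 p.2)
-- maxvec(rows): divide-and-conquer; rows[:mid] / rows[mid:] with 0 ≤ mid ≤ len are exactly take/drop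
def pvMaxvec (columns : List String) : List (List (String × String)) → List Int
  | [] => pvHeaderVec columns
  | [r] => pvMerge (pvVec columns r) (pvHeaderVec columns)
  | r1 :: r2 :: rest =>
      let rows := r1 :: r2 :: rest
      let mid := rows.length / 2
      pvMerge (pvMaxvec columns (rows.take mid)) (pvMaxvec columns (rows.drop mid))
  termination_by rows => rows.length
  decreasing_by
    · simp [List.length_take]; omega
    · simp; omega

def get_widths_alt (display_rows : List (List (String × String))) (columns : List String) : (List (String × Int)) × Int :=
  let w := pvMaxvec columns display_rows
  -- dict(zip(columns, (x + 2 for x in w)))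
  let col_widths : PySem.Dict String Int :=
    (columns.zip (w.map (fun x => x + 2))).foldl (fun d p => d.insert p.1 p.2) PySem.Dict.empty
  (col_widths.items, ((col_widths.values.map (fun x => x + 1)).sum) - 1)

-- ===== PRECONDITION & SPEC =====
def Spec_get_widths (display_rows : List (List (String × String))) (columns : List String) (out : (List (String × Int)) × Int) : Prop := out = get_widths_alt display_rows columns
instance (display_rows : List (List (String × String))) (columns : List String) (out : (List (String × Int)) × Int) : Decidable (Spec_get_widths display_rows columns out) := by unfold Spec_get_widths; infer_instance

-- ===== CLAIM (what is proved, stated in full; the proofs are below) =====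
def Claim_equal_get_widths : Prop := ∀ (display_rows : List (List (String × String))) (columns : List String), Dom_get_widths display_rows columns → Spec_get_widths display_rows columns (get_widths display_rows columns)

-- ===== LEMMAS AND PROOFS =====

-- normal form of the dicts both programs build: the distinct columns (first-occurrence order) paired by g
def pvNf (columns : List String) (g : String → Int) : PySem.Dict String Int :=
  PySem.Dict.mk ((PySem.Set.ofList columns).map (fun c => (c, g c)))

theorem pvNf_congr (columns : List String) (g g' : String → Int)
    (h : ∀ c ∈ columns, g c = g' c) : pvNf columns g = pvNf columns g' := by
  unfold pvNf
  congr 1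
  exact List.map_congr_left (fun c hc => by rw [h c ((PySem.Set.mem_ofList columns c).1 hc)])

theorem pvNf_keys (columns : List String) (g : String → Int) :
    (pvNf columns g).keys = PySem.Set.ofList columns := by
  show ((PySem.Set.ofList columns).map (fun c => (c, g c))).map (·.1) = _
  rw [List.map_map]
  exact List.map_congr_left (fun _ _ => rfl) |>.trans (List.map_id _)

theorem pvNf_contains (columns : List String) (g : String → Int) (c : String) (hc : c ∈ columns) :
    (pvNf columns g).contains c = true := by
  rw [PySem.Dict.contains_iff_mem_keys, pvNf_keys]
  exact (PySem.Set.mem_ofList columns c).2 hc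

theorem pvNf_insert (columns : List String) (g : String → Int) (c : String) (v : Int) (hc : c ∈ columns) :
    (pvNf columns g).insert c v = pvNf columns (fun x => if x = c then v else g x) := by
  apply PySem.Dict.ext
  rw [PySem.Dict.items_insert_of_contains _ v (pvNf_contains columns g c hc)]
  show ((PySem.Set.ofList columns).map (fun x => (x, g x))).map _ = (PySem.Set.ofList columns).map _
  rw [List.map_map]
  apply List.map_congr_left
  intro x _
  by_cases hx : x = c <;> simp [hx]

theorem pvBuild_eq_nf (columns : List String) (g : String → Int) :
    columns.foldl (fun d c => d.insert c (g c)) PySem.Dict.empty = pvNf columns g := by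
  induction columns using List.reverseRecOn with
  | nil => rfl
  | append_singleton cs c ih =>
    rw [List.foldl_append, List.foldl_cons, List.foldl_nil, ih]
    by_cases hc : c ∈ cs
    · rw [pvNf_insert cs g c (g c) hc]
      unfold pvNf
      rw [PySem.Set.ofList_append_singleton, PySem.Set.add_of_mem ((PySem.Set.mem_ofList cs c).2 hc)]
      congr 1
      exact List.map_congr_left (fun x _ => by by_cases hx : x = c <;> simp [hx])
    · apply PySem.Dict.ext
      rw [PySem.Dict.items_insert_of_not_contains]
      · unfold pvNf
        show _ ++ _ = List.map _ _
        rw [PySem.Set.ofList_append_singleton,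
            PySem.Set.add_of_not_mem (fun h => hc ((PySem.Set.mem_ofList cs c).1 h)), List.map_append]
        rfl
      · rw [PySem.Dict.contains_eq_decide_mem_keys, pvNf_keys]
        simp [PySem.Set.mem_ofList, hc]

theorem pvFoldlMaxComm (l : List Int) (a b : Int) :
    l.foldl max (max a b) = max (l.foldl max a) b := by
  induction l generalizing a with
  | nil => rfl
  | cons x t ih => rw [List.foldl_cons, List.foldl_cons, max_right_comm, ih]

theorem pvSeedLe (l : List Int) (a : Int) : a ≤ l.foldl max a := by
  induction l generalizing a with
  | nil => exact le_refl a
  | cons x t ih => exact le_trans (le_max_left a x) (ih (max a x))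

theorem pvMaxAppend (xs : List Int) (a : Int) :
    (PySem.List.max? (xs ++ [a]) (fun x => x)).getD 0 = xs.foldl max a := by
  cases xs with
  | nil => simp [PySem.List.max?_id_cons]
  | cons x t =>
    rw [List.cons_append, PySem.List.max?_id_cons, Option.getD_some, List.foldl_append,
        List.foldl_cons, List.foldl_nil, List.foldl_cons, max_comm a x, pvFoldlMaxComm]

theorem pvMerge_map {α : Type} (l : List α) (f h : α → Int) :
    pvMerge (l.map f) (l.map h) = l.map (fun c => max (f c) (h c)) := by
  unfold pvMerge
  rw [List.zip_map', List.map_map]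
  rfl

-- max of two seeded folds over halves = one fold over the concatenation
theorem pvFoldSplit (l1 l2 : List Int) (s : Int) :
    max (l1.foldl max s) (l2.foldl max s) = (l1 ++ l2).foldl max s := by
  rw [List.foldl_append]
  have h1 : max s (l1.foldl max s) = l1.foldl max s := max_eq_right (pvSeedLe l1 s)
  calc max (l1.foldl max s) (l2.foldl max s)
      = max (l2.foldl max s) (l1.foldl max s) := max_comm _ _
    _ = l2.foldl max (max s (l1.foldl max s)) := (pvFoldlMaxComm l2 s _).symm
    _ = l2.foldl max (l1.foldl max s) := by rw [h1]

-- characterisation of B's divide-and-conquer reduction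
theorem pvMaxvec_eq (columns : List String) (rows : List (List (String × String))) :
    pvMaxvec columns rows
      = columns.map (fun c => ((rows.map (fun r => PySem.Str.len (pvCell r c))).foldl max (PySem.Str.len c))) := by
  induction rows using pvMaxvec.induct with
  | case1 =>
    rw [pvMaxvec]
    rfl
  | case2 r =>
    rw [pvMaxvec]
    unfold pvVec pvHeaderVec
    rw [pvMerge_map]
    apply List.map_congr_left
    intro c _
    simp [max_comm]
  | case3 r1 r2 rest rows mid ih1 ih2 =>
    rw [pvMaxvec]
    rw [ih1, ih2, pvMerge_map]
    apply List.map_congr_left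
    intro c _
    rw [pvFoldSplit, ← List.map_append, List.take_append_drop]

theorem pvZipBuild (columns : List String) (g : String → Int) :
    (columns.zip (columns.map g)).foldl (fun d p => d.insert p.1 p.2) PySem.Dict.empty
      = pvNf columns g := by
  have hz : ∀ (l : List String), l.zip (l.map g) = l.map (fun c => (c, g c)) := by
    intro l
    induction l with
    | nil => rfl
    | cons x t ih => simp [ih]
  rw [hz, List.foldl_map]
  exact pvBuild_eq_nf columns g

theorem pvMain (display_rows : List (List (String × String))) (columns : List String) :
    get_widths display_rows columns = get_widths_alt display_rows columns := by
  unfold get_widths get_widths_alt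
  dsimp only
  have hA : columns.foldl (fun d col =>
      let col_cells := (display_rows.map (fun display_row => pvCell display_row col)) ++ [col]
      d.insert col ((PySem.List.max? (col_cells.map (fun c => PySem.Str.len c)) (fun x => x)).getD 0 + 2)) PySem.Dict.empty
      = pvNf columns (fun col => (PySem.List.max? (((display_rows.map (fun r => pvCell r col)) ++ [col]).map (fun c => PySem.Str.len c)) (fun x => x)).getD 0 + 2) :=
    pvBuild_eq_nf columns _
  rw [hA, pvMaxvec_eq, List.map_map, pvZipBuild]
  have hg : pvNf columns (fun col => (PySem.List.max? (((display_rows.map (fun r => pvCell r col)) ++ [col]).map (fun c => PySem.Str.len c)) (fun x => x)).getD 0 + 2)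
      = pvNf columns (fun c => ((display_rows.map (fun r => PySem.Str.len (pvCell r c))).foldl max (PySem.Str.len c)) + 2) := by
    apply pvNf_congr
    intro c _
    rw [List.map_append, List.map_map, List.map_cons, List.map_nil, pvMaxAppend]
    rfl
  rw [hg]
  rfl

-- ===== VERDICT (by name: the statement is the Claim_ definition above) =====
theorem get_widths_spec : Claim_equal_get_widths :=
  fun display_rows columns _ => pvMain display_rows columns
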